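-- pv_equiv track=rewrite | github.com/Murkiness/tlio_tools | tlio_tools/assets/transform_html.py | find_close_index
-- ===== SOURCE A (Python) =====
-- def find_close_index(line, start_pos):
--     js_ind = None
--     css_ind = None
--
--     try:
--         js_ind = line.index('.js', start_pos)
--         js_ind += 3
--     except:
--         pass
--
--     try:
--         css_ind = line.index('.css', start_pos)
--         css_ind += 4
--     except:
--         pass
--
--     arr = [js_ind, css_ind]
--     arr = [x for x in arr if x is not None]
--
--     return min(arr)
-- ===== SOURCE B (Python) =====
-- def find_close_index(line, start_pos):
--     start = start_pos if start_pos >= 0 else max(len(line) + start_pos, 0)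
--     for i in range(start, len(line)):
--         if line[i:i+3] == '.js':
--             return i + 3
--         if line[i:i+4] == '.css':
--             return i + 4
--     raise ValueError("no '.js' or '.css' at or after start_pos")
-- ===== Notes on version B (the rewrite author's own statement) =====
-- stated objective: simpler
-- what changed: Replaces the two separate str.index scans with try/except plus a min() over collected candidates by a single left-to-right scan that returns the end of the first token found.
-- outside the precondition, e.g. on find_close_index('no token here', 0): A raises ValueError, B raises ValueError
import Mathlib
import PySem

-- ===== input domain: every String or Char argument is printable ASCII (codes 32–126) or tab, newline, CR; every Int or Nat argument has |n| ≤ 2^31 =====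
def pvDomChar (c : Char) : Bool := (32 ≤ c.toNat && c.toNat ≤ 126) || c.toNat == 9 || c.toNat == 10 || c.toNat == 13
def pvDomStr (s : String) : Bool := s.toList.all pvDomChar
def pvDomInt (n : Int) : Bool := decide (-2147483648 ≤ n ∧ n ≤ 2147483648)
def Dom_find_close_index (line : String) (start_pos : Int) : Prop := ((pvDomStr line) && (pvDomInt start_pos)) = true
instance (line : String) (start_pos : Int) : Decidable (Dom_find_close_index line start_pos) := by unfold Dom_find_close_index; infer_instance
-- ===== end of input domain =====

-- B replaces A's two str.index scans + min() over collected ends by one left-to-right scan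
-- returning the end of the first '.js'/'.css' token (same complexity, simpler shape).


-- ===== PORT A =====
def find_close_index (line : String) (start_pos : Int) : Int :=
  -- try: js_ind = line.index('.js', start_pos); js_ind += 3  except: pass
  let j := PySem.Str.findFrom line ".js" start_pos
  let js_ind : Option Int := if j = -1 then none else some (j + 3)
  -- try: css_ind = line.index('.css', start_pos); css_ind += 4  except: pass
  let c := PySem.Str.findFrom line ".css" start_pos
  let css_ind : Option Int := if c = -1 then none else some (c + 4)
  -- arr = [x for x in [js_ind, css_ind] if x is not None]
  let arr : List Int := [js_ind, css_ind].filterMap id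
  -- min(arr); raises ValueError on empty arr (excluded by Pre_; 0 is a placeholder there)
  (PySem.List.min? arr id).getD 0

-- ===== PORT B =====
-- the scan loop of Source B; (cs.drop i).take k is line[i:i+k] for 0 ≤ i
def pvScanB (cs : List Char) (i : Nat) : Int :=
  if h : i < cs.length then
    if (cs.drop i).take 3 = ".js".toList then (i : Int) + 3
    else if (cs.drop i).take 4 = ".css".toList then (i : Int) + 4
    else pvScanB cs (i + 1)
  else -1  -- loop fell through: Source B raises ValueError (excluded by Pre_; -1 is a placeholder)
termination_by cs.length - i

def find_close_index_alt (line : String) (start_pos : Int) : Int :=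
  let cs := line.toList
  let start : Nat := if 0 ≤ start_pos then start_pos.toNat else (cs.length + start_pos).toNat
  pvScanB cs start

-- ===== PRECONDITION & SPEC =====
-- Pre_ = exactly the inputs where A returns: '.js' or '.css' occurs in line at or after the
-- (Python-clamped) start position; otherwise A's min([]) raises ValueError (and B raises too).
def Pre_find_close_index (line : String) (start_pos : Int) : Prop :=
  ∃ i, i < line.toList.length ∧
    (if 0 ≤ start_pos then start_pos.toNat else (line.toList.length + start_pos).toNat) ≤ i ∧
    (".js".toList <+: line.toList.drop i ∨ ".css".toList <+: line.toList.drop i)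
instance (line : String) (start_pos : Int) : Decidable (Pre_find_close_index line start_pos) := by
  unfold Pre_find_close_index; infer_instance
def pvWitness_find_close_index : String × Int := (".js", 0)

def Spec_find_close_index (line : String) (start_pos : Int) (out : Int) : Prop := out = find_close_index_alt line start_pos
instance (line : String) (start_pos : Int) (out : Int) : Decidable (Spec_find_close_index line start_pos out) := by unfold Spec_find_close_index; infer_instance

-- ===== CLAIM (what is proved, stated in full; the proofs are below) =====
def Claim_equal_find_close_index : Prop := ∀ (line : String) (start_pos : Int), Dom_find_close_index line start_pos → Pre_find_close_index line start_pos → Spec_find_close_index line start_pos (find_close_index line start_pos)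

-- ===== LEMMAS AND PROOFS =====

-- a '.js' or '.css' token starts at position i of cs
def pvTok (cs : List Char) (i : Nat) : Prop :=
  ".js".toList <+: cs.drop i ∨ ".css".toList <+: cs.drop i

lemma pvTok_lt {cs : List Char} {i : Nat} (h : pvTok cs i) : i < cs.length := by
  rcases h with h | h <;> (have := h.length_le; simp at this; omega)

lemma not_both {cs : List Char} {i : Nat} :
    ¬ (".js".toList <+: cs.drop i ∧ ".css".toList <+: cs.drop i) := by
  rintro ⟨h1, h2⟩
  rw [List.prefix_iff_eq_take] at h1 h2
  simp at h1 h2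
  have e1 : (cs.drop i).take 3 = ['.', 'j', 's'] := h1.symm
  have e2 : (cs.drop i).take 4 = ['.', 'c', 's', 's'] := h2.symm
  have : ((cs.drop i).take 4).take 3 = ['.', 'c', 's'] := by rw [e2]; rfl
  rw [List.take_take] at this
  simp [e1] at this

-- a token prefix at j ≥ k is a token infix of cs.drop k
lemma infix_drop_of_prefix_drop {cs sub : List Char} {k j : Nat} (hkj : k ≤ j)
    (h : sub <+: cs.drop j) : sub <:+: cs.drop k := by
  have hd : cs.drop j = (cs.drop k).drop (j - k) := by
    rw [List.drop_drop]; congr 1; omega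
  rw [hd] at h
  exact h.isInfix.trans (List.drop_suffix _ _).isInfix

-- B's scan, started at i, on reaching the first token start j returns its end
lemma scan_hit (cs : List Char) (d i j : Nat) (hd : j - i = d) (hij : i ≤ j)
    (hj : pvTok cs j) (hmin : ∀ t, i ≤ t → t < j → ¬ pvTok cs t) :
    pvScanB cs i = if ".js".toList <+: cs.drop j then (j : Int) + 3 else (j : Int) + 4 := by
  induction d generalizing i with
  | zero =>
    have hij' : i = j := by omega
    subst hij'
    rw [pvScanB, dif_pos (pvTok_lt hj)]
    rcases hj with h | h
    · rw [if_pos, if_pos h]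
      · rw [List.prefix_iff_eq_take] at h; simpa using h.symm
    · have hnjs : ¬ ".js".toList <+: cs.drop i := fun hh => not_both ⟨hh, h⟩
      rw [if_neg, if_pos, if_neg hnjs]
      · rw [List.prefix_iff_eq_take] at h; simpa using h.symm
      · intro hh
        exact hnjs (by rw [List.prefix_iff_eq_take]; simpa using hh.symm)
  | succ d ih =>
    have hilt : i < j := by omega
    have hni : ¬ pvTok cs i := hmin i le_rfl hilt
    rw [pvScanB, dif_pos (by have := pvTok_lt hj; omega)]
    rw [if_neg, if_neg]
    · exact ih (i + 1) (by omega) (by omega) (fun t ht ht' => hmin t (by omega) ht')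
    · intro hh
      exact hni (Or.inr (by rw [List.prefix_iff_eq_take]; simpa using hh.symm))
    · intro hh
      exact hni (Or.inl (by rw [List.prefix_iff_eq_take]; simpa using hh.symm))

-- Python's start clamping in str.find(sub, start): negative starts count from the end, floored at 0
lemma findFrom_clamp (s sub : List Char) (sp : Int) :
    PySem.Chars.findFrom s sub sp none =
      PySem.Chars.findFrom s sub (((if 0 ≤ sp then sp.toNat else (s.length + sp).toNat) : Nat) : Int) none := by
  by_cases h : 0 ≤ sp
  · simp [h, Int.toNat_of_nonneg h]
  · have h1 : sp < 0 := by omega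
    have h2 : ¬ ((((s.length + sp).toNat : Nat) : Int) < 0) := by omega
    have h3 : (if sp + (s.length : Int) < 0 then (0 : Int) else sp + s.length) = (((s.length + sp).toNat : Nat) : Int) := by
      split_ifs <;> omega
    unfold PySem.Chars.findFrom
    simp only [if_neg h, if_pos h1, if_neg h2, h3]

lemma min2_getD (x y : Int) : (PySem.List.min? [x, y] id).getD 0 = min x y := by
  simp only [PySem.List.min?, List.foldl, id]
  split_ifs <;> simp [min_def] <;> omega

lemma min1_getD (x : Int) : (PySem.List.min? [x] id).getD 0 = x := by
  simp [PySem.List.min?]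

-- ===== VERDICT (by name: the statement is the Claim_ definition above) =====
theorem find_close_index_spec : Claim_equal_find_close_index := by
  intro line sp _hdom hpre
  unfold Spec_find_close_index
  obtain ⟨j0, hj0n, hkj0, hP0⟩ := hpre
  have hP0' : pvTok line.toList j0 := hP0
  have hkn : (if 0 ≤ sp then sp.toNat else (line.toList.length + sp).toNat) ≤ line.toList.length := by omega
  generalize hkdef : (if 0 ≤ sp then sp.toNat else (line.toList.length + sp).toNat) = k at *
  haveI : DecidablePred (fun j => k ≤ j ∧ pvTok line.toList j) := fun j => by
    unfold pvTok; infer_instance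
  have hex : ∃ j, k ≤ j ∧ pvTok line.toList j := ⟨j0, hkj0, hP0'⟩
  obtain ⟨hkj, hPj⟩ := Nat.find_spec hex
  have hmin : ∀ t, k ≤ t → t < Nat.find hex → ¬ pvTok line.toList t :=
    fun t ht hlt hp => Nat.find_min hex hlt ⟨ht, hp⟩
  have hjle : ∀ t, k ≤ t → pvTok line.toList t → Nat.find hex ≤ t :=
    fun t ht hp => Nat.find_min' hex ⟨ht, hp⟩
  -- B's value
  have hB : find_close_index_alt line sp =
      if ".js".toList <+: line.toList.drop (Nat.find hex) then ((Nat.find hex : Int)) + 3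
      else ((Nat.find hex : Int)) + 4 := by
    simp only [find_close_index_alt]
    rw [hkdef]
    exact scan_hit line.toList (Nat.find hex - k) k (Nat.find hex) rfl hkj hPj hmin
  -- A's findFrom calls, normalized to the clamped Nat start
  have hjsF : PySem.Str.findFrom line ".js" sp = PySem.Chars.findFrom line.toList ".js".toList (k : Int) none := by
    rw [PySem.Str.findFrom_eq, findFrom_clamp, hkdef]
  have hcssF : PySem.Str.findFrom line ".css" sp = PySem.Chars.findFrom line.toList ".css".toList (k : Int) none := by
    rw [PySem.Str.findFrom_eq, findFrom_clamp, hkdef]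
  rw [hB]
  simp only [find_close_index]
  rw [hjsF, hcssF]
  by_cases hjs : ".js".toList <:+: line.toList.drop k
  · have hjsne : PySem.Chars.findFrom line.toList ".js".toList (k : Int) none ≠ -1 :=
      fun h => ((PySem.Chars.findFrom_natCast_eq_neg_one_iff line.toList ".js".toList k hkn).mp h) hjs
    obtain ⟨hkFj, hprefj, hminj⟩ := PySem.Chars.findFrom_natCast_spec line.toList ".js".toList k hkn hjsne
    have hFj0 : (0 : Int) ≤ PySem.Chars.findFrom line.toList ".js".toList (k : Int) none := by
      have : (0:Int) ≤ (k : Int) := by positivity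
      omega
    set Fj := PySem.Chars.findFrom line.toList ".js".toList (k : Int) none with hFjdef
    have hkFjn : k ≤ Fj.toNat := by omega
    have hja : Nat.find hex ≤ Fj.toNat := hjle _ hkFjn (Or.inl hprefj)
    by_cases hcss : ".css".toList <:+: line.toList.drop k
    · -- both tokens occur after k
      have hcssne : PySem.Chars.findFrom line.toList ".css".toList (k : Int) none ≠ -1 :=
        fun h => ((PySem.Chars.findFrom_natCast_eq_neg_one_iff line.toList ".css".toList k hkn).mp h) hcss
      obtain ⟨hkFc, hprefc, hminc⟩ := PySem.Chars.findFrom_natCast_spec line.toList ".css".toList k hkn hcssne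
      have hFc0 : (0 : Int) ≤ PySem.Chars.findFrom line.toList ".css".toList (k : Int) none := by
        have : (0:Int) ≤ (k : Int) := by positivity
        omega
      set Fc := PySem.Chars.findFrom line.toList ".css".toList (k : Int) none with hFcdef
      have hkFcn : k ≤ Fc.toNat := by omega
      have hjb : Nat.find hex ≤ Fc.toNat := hjle _ hkFcn (Or.inr hprefc)
      rw [if_neg hjsne, if_neg hcssne]
      have harr : ([some (Fj + 3), some (Fc + 4)] : List (Option Int)).filterMap id = [Fj + 3, Fc + 4] := by
        simp
      rw [harr, min2_getD]
      rcases hPj with hjsj | hcssj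
      · -- the first token is a '.js'
        have haj : Fj.toNat ≤ Nat.find hex := by
          by_contra hlt
          exact hminj (Nat.find hex) hkj (by omega) hjsj
        rw [if_pos hjsj, min_eq_left (by omega : Fj + 3 ≤ Fc + 4)]
        omega
      · -- the first token is a '.css'; no '.js' can start there
        have hbj : Fc.toNat ≤ Nat.find hex := by
          by_contra hlt
          exact hminc (Nat.find hex) hkj (by omega) hcssj
        have hnjs : ¬ ".js".toList <+: line.toList.drop (Nat.find hex) :=
          fun hh => not_both ⟨hh, hcssj⟩
        have hne : Fc.toNat ≠ Fj.toNat := by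
          intro he
          exact not_both ⟨hprefj, he ▸ hprefc⟩
        have haj2 : Fc.toNat < Fj.toNat := by omega
        rw [if_neg hnjs, min_eq_right (by omega : Fc + 4 ≤ Fj + 3)]
        omega
    · -- only '.js' occurs
      have hcsse : PySem.Chars.findFrom line.toList ".css".toList (k : Int) none = -1 :=
        (PySem.Chars.findFrom_natCast_eq_neg_one_iff line.toList ".css".toList k hkn).mpr hcss
      rw [if_neg hjsne, if_pos hcsse]
      have harr : ([some (Fj + 3), none] : List (Option Int)).filterMap id = [Fj + 3] := by
        simp
      rw [harr, min1_getD]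
      have hjsj : ".js".toList <+: line.toList.drop (Nat.find hex) := by
        rcases hPj with h | h
        · exact h
        · exact absurd (infix_drop_of_prefix_drop hkj h) hcss
      have haj : Fj.toNat ≤ Nat.find hex := by
        by_contra hlt
        exact hminj (Nat.find hex) hkj (by omega) hjsj
      rw [if_pos hjsj]
      omega
  · have hjse : PySem.Chars.findFrom line.toList ".js".toList (k : Int) none = -1 :=
      (PySem.Chars.findFrom_natCast_eq_neg_one_iff line.toList ".js".toList k hkn).mpr hjs
    by_cases hcss : ".css".toList <:+: line.toList.drop k
    · -- only '.css' occurs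
      have hcssne : PySem.Chars.findFrom line.toList ".css".toList (k : Int) none ≠ -1 :=
        fun h => ((PySem.Chars.findFrom_natCast_eq_neg_one_iff line.toList ".css".toList k hkn).mp h) hcss
      obtain ⟨hkFc, hprefc, hminc⟩ := PySem.Chars.findFrom_natCast_spec line.toList ".css".toList k hkn hcssne
      have hFc0 : (0 : Int) ≤ PySem.Chars.findFrom line.toList ".css".toList (k : Int) none := by
        have : (0:Int) ≤ (k : Int) := by positivity
        omega
      set Fc := PySem.Chars.findFrom line.toList ".css".toList (k : Int) none with hFcdef
      have hkFcn : k ≤ Fc.toNat := by omega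
      rw [if_pos hjse, if_neg hcssne]
      have harr : ([none, some (Fc + 4)] : List (Option Int)).filterMap id = [Fc + 4] := by
        simp
      rw [harr, min1_getD]
      have hcssj : ".css".toList <+: line.toList.drop (Nat.find hex) := by
        rcases hPj with h | h
        · exact absurd (infix_drop_of_prefix_drop hkj h) hjs
        · exact h
      have hnjs : ¬ ".js".toList <+: line.toList.drop (Nat.find hex) :=
        fun hh => hjs (infix_drop_of_prefix_drop hkj hh)
      have hjb : Nat.find hex ≤ Fc.toNat := hjle _ hkFcn (Or.inr hprefc)
      have hbj : Fc.toNat ≤ Nat.find hex := by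
        by_contra hlt
        exact hminc (Nat.find hex) hkj (by omega) hcssj
      rw [if_neg hnjs]
      omega
    · -- neither occurs: contradicts Pre_
      exfalso
      rcases hPj with h | h
      · exact hjs (infix_drop_of_prefix_drop hkj h)
      · exact hcss (infix_drop_of_prefix_drop hkj h)
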